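-- pv_equiv track=rewrite | github.com/cloud99277/927-agent-toolchain | docs/phase-1-io-contracts/verify-chain.py | check_type_match
-- ===== SOURCE A (Python) =====
-- COMPATIBILITY_RULES = {
--     "markdown_file": ["text"],
--     "text": ["markdown_file", "url"],
-- }
--
-- def check_type_match(output_type, input_types):
--     """检查 output_type 是否匹配 input_types 中的任何一个。
--
--     返回 (matched, match_kind, matched_type)
--     """
--     # 精确匹配
--     if output_type in input_types:
--         return True, "exact", output_type
--
--     # 兼容匹配
--     compatible = COMPATIBILITY_RULES.get(output_type, [])
--     for inp_type in input_types:
--         if inp_type in compatible: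
--             return True, "compatible", inp_type
--
--     return False, "none", None
-- ===== SOURCE B (Python) =====
-- COMPATIBILITY_RULES = {
--     "markdown_file": ["text"],
--     "text": ["markdown_file", "url"],
-- }
--
-- def check_type_match(output_type, input_types):
--     """Single pass: return exact at once, remember the first compatible type."""
--     compatible = COMPATIBILITY_RULES.get(output_type, [])
--     first_compatible = None
--     for t in input_types:
--         if t == output_type:
--             return True, "exact", output_type
--         if first_compatible is None and t in compatible:
--             first_compatible = t
--     if first_compatible is not None:
--         return True, "compatible", first_compatible
--     return False, "none", None
-- ===== Notes on version B (the rewrite author's own statement) =====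
-- stated objective: alternative
-- what changed: Replaces A's membership scan plus a second loop over input_types with one single pass that returns an exact match immediately and remembers the first compatible type.
import Mathlib
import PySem

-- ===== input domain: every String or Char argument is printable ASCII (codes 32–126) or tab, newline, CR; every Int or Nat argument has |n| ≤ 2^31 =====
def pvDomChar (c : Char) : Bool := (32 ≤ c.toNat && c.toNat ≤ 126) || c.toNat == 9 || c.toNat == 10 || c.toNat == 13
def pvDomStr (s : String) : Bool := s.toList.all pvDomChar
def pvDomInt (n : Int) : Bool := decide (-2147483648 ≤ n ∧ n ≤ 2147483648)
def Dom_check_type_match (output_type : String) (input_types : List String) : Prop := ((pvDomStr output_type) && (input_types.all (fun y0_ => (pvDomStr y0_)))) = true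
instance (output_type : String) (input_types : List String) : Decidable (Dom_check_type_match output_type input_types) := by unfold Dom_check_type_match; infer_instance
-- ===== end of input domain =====

-- B replaces A's membership test plus second loop with one single pass keeping the first compatible type (same cost, different decomposition).

-- ===== PORT A =====
def COMPATIBILITY_RULES : PySem.Dict String (List String) :=
  PySem.Dict.ofList [("markdown_file", ["text"]), ("text", ["markdown_file", "url"])]

-- A's second loop: first element of the list that lies in `compatible`
def ctmLoopA (compatible : List String) : List String → Bool × String × Option String
  | [] => (false, "none", none)
  | t :: rest =>
    if compatible.contains t then (true, "compatible", some t)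
    else ctmLoopA compatible rest

def check_type_match (output_type : String) (input_types : List String) : Bool × String × Option String :=
  if input_types.contains output_type then (true, "exact", some output_type)
  else ctmLoopA (PySem.Dict.getD COMPATIBILITY_RULES output_type []) input_types

-- ===== PORT B =====
-- B's single pass with the `first_compatible` accumulator
def ctmLoopB (output_type : String) (compatible : List String) (first : Option String) :
    List String → Bool × String × Option String
  | [] =>
    match first with
    | some c => (true, "compatible", some c)
    | none => (false, "none", none)
  | t :: rest =>
    if t == output_type then (true, "exact", some output_type)
    else ctmLoopB output_type compatible
      (if first.isNone && compatible.contains t then some t else first) rest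

def check_type_match_alt (output_type : String) (input_types : List String) : Bool × String × Option String :=
  ctmLoopB output_type (PySem.Dict.getD COMPATIBILITY_RULES output_type []) none input_types

-- ===== PRECONDITION & SPEC =====
def Spec_check_type_match (output_type : String) (input_types : List String) (out : Bool × String × Option String) : Prop := out = check_type_match_alt output_type input_types
instance (output_type : String) (input_types : List String) (out : Bool × String × Option String) : Decidable (Spec_check_type_match output_type input_types out) := by unfold Spec_check_type_match; infer_instance

-- ===== CLAIM (what is proved, stated in full; the proofs are below) =====
def Claim_equal_check_type_match : Prop := ∀ (output_type : String) (input_types : List String), Dom_check_type_match output_type input_types → Spec_check_type_match output_type input_types (check_type_match output_type input_types)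

-- ===== LEMMAS AND PROOFS =====

-- If the output type occurs in the list, B's loop returns the exact match whatever the accumulator.
theorem ctmLoopB_exact (o : String) (comp : List String) (ts : List String)
    (h : ts.contains o = true) (first : Option String) :
    ctmLoopB o comp first ts = (true, "exact", some o) := by
  induction ts generalizing first with
  | nil => simp at h
  | cons t rest ih =>
    simp only [ctmLoopB]
    by_cases ht : t == o
    · simp [ht]
    · simp only [List.contains_cons] at h
      rw [Bool.or_eq_true] at h
      rcases h with h | h
      · exact absurd (by simpa using (beq_iff_eq.mp h).symm) (by simpa using ht)
      · simp [ht, ih h]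

-- Once a compatible type is recorded and no exact match follows, B's loop keeps it.
theorem ctmLoopB_keep (o : String) (comp : List String) (ts : List String)
    (h : ts.contains o = false) (c : String) :
    ctmLoopB o comp (some c) ts = (true, "compatible", some c) := by
  induction ts with
  | nil => simp [ctmLoopB]
  | cons t rest ih =>
    simp only [List.contains_cons, Bool.or_eq_false_iff] at h
    have ht : (t == o) = false := by
      rw [beq_eq_false_iff_ne]
      exact fun e => (beq_eq_false_iff_ne.mp h.1) e.symm
    simp only [ctmLoopB, ht, Bool.false_eq_true, if_false, Option.isNone_some,
      Bool.false_and]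
    exact ih h.2

-- With no exact match and an empty accumulator, B's loop computes A's second loop.
theorem ctmLoopB_eq_loopA (o : String) (comp : List String) (ts : List String)
    (h : ts.contains o = false) :
    ctmLoopB o comp none ts = ctmLoopA comp ts := by
  induction ts with
  | nil => simp [ctmLoopB, ctmLoopA]
  | cons t rest ih =>
    simp only [List.contains_cons, Bool.or_eq_false_iff] at h
    have ht : (t == o) = false := by
      rw [beq_eq_false_iff_ne]
      exact fun e => (beq_eq_false_iff_ne.mp h.1) e.symm
    by_cases hc : comp.contains t = true
    · simp only [ctmLoopB, ctmLoopA, ht, Bool.false_eq_true, if_false, hc, if_true,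
        Option.isNone_none, Bool.true_and]
      exact ctmLoopB_keep o comp rest h.2 t
    · have hc' : comp.contains t = false := by simpa using hc
      simp only [ctmLoopB, ctmLoopA, ht, Bool.false_eq_true, if_false, hc',
        Option.isNone_none, Bool.true_and]
      exact ih h.2

-- ===== VERDICT (by name: the statement is the Claim_ definition above) =====
theorem check_type_match_spec : Claim_equal_check_type_match := by
  intro o ts _
  unfold Spec_check_type_match check_type_match check_type_match_alt
  by_cases h : ts.contains o = true
  · rw [if_pos h]
    exact (ctmLoopB_exact o _ ts h none).symm
  · rw [if_neg h]
    exact (ctmLoopB_eq_loopA o _ ts (by simpa using h)).symm
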